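-- pv_equiv track=rewrite | github.com/MathPlayer/advent-of-code-solved | 2024/12/solve.py | part_1
-- ===== SOURCE A (Python) =====
-- def get_region(data, coords):
--     region = set()
--     stack = [coords]
--     while stack:
--         x, y = stack.pop()
--         if (x, y) in region:
--             continue
--         region.add((x, y))
--         for dx, dy in [(0, 1), (1, 0), (0, -1), (-1, 0)]:
--             new_x, new_y = x + dx, y + dy
--             if (new_x, new_y) in data and data[(new_x, new_y)] == data[coords]:
--                 stack.append((new_x, new_y))
--
--     return region
--
-- def cost(region):
--     area = len(region)
--     perimeter = 0
--
--     for x, y in region: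
--         neighbors = 0
--         for dx, dy in [(0, 1), (1, 0), (0, -1), (-1, 0)]:
--             if (x + dx, y + dy) in region:
--                 neighbors += 1
--         perimeter += 4 - neighbors
--
--     return area * perimeter
--
-- def part_1(data):
--     result = 0
--
--     visited = set()
--     for coords in data:
--         if coords in visited:
--             continue
--         region = get_region(data, coords)
--         visited |= region
--         result += cost(region)
--
--     return result
-- ===== SOURCE B (Python) =====
-- def _component(data, start):
--     """BFS (FIFO) collecting the connected same-value component of start;
--     cells are marked when enqueued, so no revisit check on dequeue."""
--     v = data[start]
--     seen = {start}
--     queue = [start]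
--     while queue:
--         x, y = queue.pop(0)
--         for n in ((x, y + 1), (x + 1, y), (x, y - 1), (x - 1, y)):
--             if n not in seen and data.get(n) == v:
--                 seen.add(n)
--                 queue.append(n)
--     return seen
--
--
-- def part_1(data):
--     # Phase 1: label every cell with the representative (first cell) of its region.
--     labels = {}
--     for start in data:
--         if start not in labels:
--             for cell in _component(data, start):
--                 labels[cell] = start
--     # Phase 2: region areas = multiplicity of each representative among the labels.
--     area = {}
--     for rep in labels.values():
--         area[rep] = area.get(rep, 0) + 1
--     # Phase 3: each boundary edge of a cell contributes that region's area once;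
--     # a neighbour is in the same region iff it holds the same value.
--     total = 0
--     for (x, y), rep in labels.items():
--         edges = sum(1 for n in ((x, y + 1), (x + 1, y), (x, y - 1), (x - 1, y))
--                     if data.get(n) != data[(x, y)])
--         total += area[rep] * edges
--     return total
-- ===== Notes on version B (the rewrite author's own statement) =====
-- stated objective: alternative
-- what changed: A's per-region DFS (explicit stack, revisit check on pop) with a per-region cost pass is replaced by a three-phase labelling algorithm: a FIFO BFS that marks cells when enqueued labels every cell with its region's representative, a counting pass over the labels yields each region's area, and one final pass sums area[rep] * boundary-edges per cell, where a neighbour is in the same region iff it holds the same value.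
import Mathlib
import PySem

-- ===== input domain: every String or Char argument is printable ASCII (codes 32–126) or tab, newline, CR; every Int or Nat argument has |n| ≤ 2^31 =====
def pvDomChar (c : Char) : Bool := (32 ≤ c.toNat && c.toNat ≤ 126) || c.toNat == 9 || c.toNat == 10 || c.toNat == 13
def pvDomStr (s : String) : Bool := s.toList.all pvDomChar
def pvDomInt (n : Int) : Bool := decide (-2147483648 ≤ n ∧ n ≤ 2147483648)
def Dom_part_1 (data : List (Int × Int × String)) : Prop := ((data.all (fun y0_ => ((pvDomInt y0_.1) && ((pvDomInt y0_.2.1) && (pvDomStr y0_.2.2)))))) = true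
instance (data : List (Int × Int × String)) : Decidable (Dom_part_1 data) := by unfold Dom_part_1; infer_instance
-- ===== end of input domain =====

-- B replaces A's per-region stack flood fill + per-region cost by a three-phase pass:
-- label every cell with its region's representative (FIFO BFS, mark on enqueue), count
-- label multiplicities for the areas, then sum area[rep] * boundary-edges per cell,
-- where a neighbour is in the same region iff it holds the same value; alternative
-- decomposition, same cost.

-- ===== PORT A =====
-- the Python `data` is a dict keyed by (x, y); key of an entry:
def pvKey (t : Int × Int × String) : Int × Int := (t.1, t.2.1)

-- data[(x,y)] as first-match lookup in the association list (unique keys by Pre_)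
def dget (data : List (Int × Int × String)) (c : Int × Int) : Option String :=
  (data.find? (fun t => pvKey t == c)).map (fun t => t.2.2)

def deltas : List (Int × Int) := [(0, 1), (1, 0), (0, -1), (-1, 0)]

def nb (c d : Int × Int) : Int × Int := (c.1 + d.1, c.2 + d.2)

-- "(n in data) and data[n] == v"
def goodCell (data : List (Int × Int × String)) (v : Option String) (n : Int × Int) : Bool :=
  (dget data n).isSome && (dget data n == v)

-- A's while-loop over the stack; the Python list's top (pop/append end) is the head here,
-- so the four in-order appends become `ns.reverse ++ stack`.  Fuel 5*|data|+2 is proved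
-- sufficient below (each pop consumes one stack cell, each of the ≤ |data| region
-- insertions pushes ≤ 4 cells).
def getRegionLoop (data : List (Int × Int × String)) (v : Option String) :
    Nat → PySem.Set (Int × Int) → List (Int × Int) → PySem.Set (Int × Int)
  | 0, region, _ => region
  | _ + 1, region, [] => region
  | fuel + 1, region, c :: stack =>
    if PySem.Set.contains region c then
      getRegionLoop data v fuel region stack
    else
      let ns := (deltas.map (nb c)).filter (goodCell data v)
      getRegionLoop data v fuel (PySem.Set.add region c) (ns.reverse ++ stack)

def getRegion (data : List (Int × Int × String)) (coords : Int × Int) : PySem.Set (Int × Int) :=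
  getRegionLoop data (dget data coords) (5 * data.length + 2) PySem.Set.empty [coords]

-- cost(region): iterates a Python set summing ints — order-independent, so folding the
-- PySem.Set's list is exact.
def costA (region : PySem.Set (Int × Int)) : Int :=
  (region.length : Int) *
    region.foldl (fun per c =>
      per + (4 - deltas.foldl (fun nbrs d =>
        if PySem.Set.contains region (nb c d) then nbrs + 1 else nbrs) (0 : Int))) 0

def part_1 (data : List (Int × Int × String)) : Int :=
  (data.foldl (fun (st : Int × PySem.Set (Int × Int)) t =>
      if PySem.Set.contains st.2 (pvKey t) then st
      else
        let region := getRegion data (pvKey t)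
        (st.1 + costA region, PySem.Set.union st.2 region)) ((0 : Int), PySem.Set.empty)).1

-- ===== PORT B =====
-- the four orthogonal neighbour points of a cell, in B's literal order
def nbrsB (c : Int × Int) : List (Int × Int) :=
  [(c.1, c.2 + 1), (c.1 + 1, c.2), (c.1, c.2 - 1), (c.1 - 1, c.2)]

-- data.get(n): a hand-written first-match scan of the association list
def lookB : List (Int × Int × String) → (Int × Int) → Option String
  | [], _ => none
  | (a, b, s) :: rest, c => if (a, b) == c then some s else lookB rest c

-- B's FIFO BFS (`queue.pop(0)`): cells marked seen when enqueued; the inner for-loop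
-- over the 4 neighbour points updates (seen, queue).  Fuel 5*|data|+2 is proved
-- sufficient below (one dequeue per round, every enqueue is a fresh seen-insertion).
def growB (data : List (Int × Int × String)) (v : String) :
    Nat → PySem.Set (Int × Int) → List (Int × Int) → PySem.Set (Int × Int)
  | 0, seen, _ => seen
  | _ + 1, seen, [] => seen
  | fuel + 1, seen, c :: rest =>
    let st := (nbrsB c).foldl
      (fun (p : PySem.Set (Int × Int) × List (Int × Int)) n =>
        if !PySem.Set.contains p.1 n && (lookB data n == some v) then
          (PySem.Set.add p.1 n, p.2 ++ [n])
        else p) (seen, rest)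
    growB data v fuel st.1 st.2

def componentB (data : List (Int × Int × String)) (start : Int × Int) : List (Int × Int) :=
  match lookB data start with
  | some v => growB data v (5 * data.length + 2) [start] [start]
  | none => [start]   -- unreachable in part_1_alt (Python: KeyError); start is a key there

def part_1_alt (data : List (Int × Int × String)) : Int :=
  -- Phase 1: labels[cell] = representative of its region
  let labels := data.foldl
    (fun (lab : PySem.Dict (Int × Int) (Int × Int)) t =>
      if PySem.Dict.contains lab (t.1, t.2.1) then lab
      else (componentB data (t.1, t.2.1)).foldl
        (fun lab c => PySem.Dict.insert lab c (t.1, t.2.1)) lab)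
    PySem.Dict.empty
  -- Phase 2: area[rep] = multiplicity of rep among the labels
  let area := (PySem.Dict.values labels).foldl
    (fun (a : PySem.Dict (Int × Int) Int) r =>
      PySem.Dict.insert a r (PySem.Dict.getD a r 0 + 1))
    PySem.Dict.empty
  -- Phase 3: every boundary edge of a cell contributes its region's area once
  (PySem.Dict.items labels).foldl
    (fun tot cr =>
      tot + PySem.Dict.getD area cr.2 0 *
        ((nbrsB cr.1).foldl
          (fun e n => if lookB data n != lookB data cr.1 then e + 1 else e) (0 : Int)))
    (0 : Int)

-- ===== PRECONDITION & SPEC =====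
-- Pre_ excludes association lists with duplicate (x, y) keys: the list stands for a
-- Python dict (which cannot hold duplicate keys), and on duplicates Python's dict
-- construction collapses them (last value wins) while the list ports read the first value.
def Pre_part_1 (data : List (Int × Int × String)) : Prop :=
  (data.map (fun t => (t.1, t.2.1))).Nodup
instance (data : List (Int × Int × String)) : Decidable (Pre_part_1 data) := by
  unfold Pre_part_1; infer_instance

def pvWitness_part_1 : (List (Int × Int × String)) :=
  [(0, 0, "a"), (0, 1, "a"), (5, 5, "b")]

def Spec_part_1 (data : List (Int × Int × String)) (out : Int) : Prop := out = part_1_alt data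
instance (data : List (Int × Int × String)) (out : Int) : Decidable (Spec_part_1 data out) := by
  unfold Spec_part_1; infer_instance

-- ===== CLAIM (what is proved, stated in full; the proofs are below) =====
def Claim_equal_part_1 : Prop := ∀ (data : List (Int × Int × String)), Dom_part_1 data → Pre_part_1 data → Spec_part_1 data (part_1 data)

-- ===== LEMMAS AND PROOFS =====

-- the same-value adjacency relation both searches explore
def Estep (data : List (Int × Int × String)) (v : Option String) (c n : Int × Int) : Prop :=
  (∃ d ∈ deltas, n = nb c d) ∧ goodCell data v n = true

def Reach (data : List (Int × Int × String)) (v : Option String) (c0 n : Int × Int) : Prop :=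
  Relation.ReflTransGen (Estep data v) c0 n

-- the finite universe of same-value cells
def Kf (data : List (Int × Int × String)) (v : Option String) : Finset (Int × Int) :=
  (data.map pvKey).toFinset.filter (fun c => goodCell data v c = true)

lemma dget_isSome_iff (data : List (Int × Int × String)) (n : Int × Int) :
    (dget data n).isSome = true ↔ n ∈ data.map pvKey := by
  simp only [dget, Option.isSome_map, List.find?_isSome, List.mem_map]
  constructor
  · rintro ⟨t, ht, hp⟩; exact ⟨t, ht, by simpa using hp⟩
  · rintro ⟨t, ht, hp⟩; exact ⟨t, ht, by simp [hp]⟩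

lemma good_mem_Kf {data : List (Int × Int × String)} {v : Option String} {n : Int × Int}
    (h : goodCell data v n = true) : n ∈ Kf data v := by
  have h' := h
  simp only [goodCell, Bool.and_eq_true] at h'
  simp only [Kf, Finset.mem_filter, List.mem_toFinset]
  exact ⟨(dget_isSome_iff data n).1 h'.1, h⟩

lemma card_Kf_le (data : List (Int × Int × String)) (v : Option String) :
    (Kf data v).card ≤ data.length := by
  calc (Kf data v).card ≤ (data.map pvKey).toFinset.card := Finset.card_filter_le _ _
    _ ≤ (data.map pvKey).length := (data.map pvKey).toFinset_card_le
    _ = data.length := by simp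

lemma mem_succs (data : List (Int × Int × String)) (v : Option String) (c n : Int × Int) :
    n ∈ (deltas.map (nb c)).filter (goodCell data v) ↔ Estep data v c n := by
  simp only [List.mem_filter, List.mem_map, Estep]
  constructor
  · rintro ⟨⟨d, hd, rfl⟩, hg⟩; exact ⟨⟨d, hd, rfl⟩, hg⟩
  · rintro ⟨⟨d, hd, rfl⟩, hg⟩; exact ⟨⟨d, hd, rfl⟩, hg⟩

lemma card_drop {data : List (Int × Int × String)} {v : Option String}
    {region : PySem.Set (Int × Int)} {c : Int × Int}
    (hc : goodCell data v c = true) (hcr : c ∉ region) :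
    ((Kf data v) \ (PySem.Set.add region c).toFinset).card + 1 =
      ((Kf data v) \ region.toFinset).card := by
  rw [PySem.Set.add_of_not_mem hcr]
  have : (region ++ [c]).toFinset = insert c region.toFinset := by
    rw [List.toFinset_append]; simp
  rw [this, Finset.sdiff_insert]
  exact Finset.card_erase_add_one (by
    simp only [Finset.mem_sdiff, List.mem_toFinset]
    exact ⟨good_mem_Kf hc, hcr⟩)

lemma ns_len_le (data : List (Int × Int × String)) (v : Option String) (c : Int × Int) :
    ((deltas.map (nb c)).filter (goodCell data v)).length ≤ 4 := by
  calc ((deltas.map (nb c)).filter (goodCell data v)).length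
      ≤ (deltas.map (nb c)).length := List.length_filter_le _ _
    _ = 4 := by simp [deltas]

def muA (data : List (Int × Int × String)) (v : Option String)
    (region stack : List (Int × Int)) : Nat :=
  5 * ((Kf data v) \ region.toFinset).card + stack.length

lemma dfsA_mono (data : List (Int × Int × String)) (v : Option String) :
    ∀ (f : Nat) (region : PySem.Set (Int × Int)) (stack : List (Int × Int)) (x : Int × Int),
      x ∈ region → x ∈ getRegionLoop data v f region stack := by
  intro f
  induction f with
  | zero => intro region stack x hx; simpa [getRegionLoop] using hx
  | succ f ih =>
    intro region stack x hx
    cases stack with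
    | nil => simpa [getRegionLoop] using hx
    | cons c st =>
      simp only [getRegionLoop]
      by_cases hc : PySem.Set.contains region c = true
      · rw [if_pos hc]; exact ih _ _ x hx
      · rw [if_neg hc]
        exact ih _ _ x ((PySem.Set.mem_add _ _ _).2 (Or.inl hx))

lemma dfsA_stack_mem (data : List (Int × Int × String)) (v : Option String) :
    ∀ (f : Nat) (region : PySem.Set (Int × Int)) (stack : List (Int × Int)),
      (∀ c ∈ stack, goodCell data v c = true) → muA data v region stack ≤ f →
      ∀ s ∈ stack, s ∈ getRegionLoop data v f region stack := by
  intro f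
  induction f with
  | zero =>
    intro region stack _ hmu s hs
    have : stack = [] := List.eq_nil_of_length_eq_zero (by simp only [muA] at hmu; omega)
    subst this; cases hs
  | succ f ih =>
    intro region stack hg hmu s hs
    cases stack with
    | nil => cases hs
    | cons c st =>
      simp only [getRegionLoop]
      by_cases hc : PySem.Set.contains region c = true
      · rw [if_pos hc]
        rcases List.mem_cons.1 hs with rfl | hs
        · exact dfsA_mono data v f region st s ((PySem.Set.contains_iff _ _).1 hc)
        · exact ih region st (fun u hu => hg u (List.mem_cons_of_mem _ hu))
            (by simp only [muA] at hmu ⊢; simp at hmu ⊢; omega) s hs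
      · rw [if_neg hc]
        have hcr : c ∉ region := fun hm => hc ((PySem.Set.contains_iff _ _).2 hm)
        have hgc : goodCell data v c = true := hg c List.mem_cons_self
        have hcard := card_drop hgc hcr
        have hns := ns_len_le data v c
        have hmu' : muA data v (PySem.Set.add region c)
            (((deltas.map (nb c)).filter (goodCell data v)).reverse ++ st) ≤ f := by
          simp only [muA, List.length_append, List.length_reverse] at hmu ⊢
          simp only [List.length_cons] at hmu
          omega
        rcases List.mem_cons.1 hs with rfl | hs
        · exact dfsA_mono data v f _ _ s ((PySem.Set.mem_add _ _ _).2 (Or.inr rfl))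
        · refine ih _ _ ?_ hmu' s (List.mem_append_right _ hs)
          intro u hu
          rcases List.mem_append.1 hu with hu | hu
          · exact ((mem_succs data v c u).1 (List.mem_reverse.1 hu)).2
          · exact hg u (List.mem_cons_of_mem _ hu)

lemma dfsA_closed (data : List (Int × Int × String)) (v : Option String) :
    ∀ (f : Nat) (region : PySem.Set (Int × Int)) (stack : List (Int × Int)),
      (∀ c ∈ stack, goodCell data v c = true) →
      (∀ r ∈ region, ∀ n, Estep data v r n → n ∈ region ∨ n ∈ stack) →
      muA data v region stack ≤ f →
      ∀ x ∈ getRegionLoop data v f region stack, ∀ n, Estep data v x n →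
        n ∈ getRegionLoop data v f region stack := by
  intro f
  induction f with
  | zero =>
    intro region stack _ hH hmu x hx n hE
    have hst : stack = [] := List.eq_nil_of_length_eq_zero (by simp only [muA] at hmu; omega)
    subst hst
    simp only [getRegionLoop] at hx ⊢
    rcases hH x hx n hE with h | h
    · exact h
    · cases h
  | succ f ih =>
    intro region stack hg hH hmu x hx n hE
    cases stack with
    | nil =>
      simp only [getRegionLoop] at hx ⊢
      rcases hH x hx n hE with h | h
      · exact h
      · cases h
    | cons c st =>
      simp only [getRegionLoop] at hx ⊢
      by_cases hc : PySem.Set.contains region c = true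
      · rw [if_pos hc] at hx ⊢
        refine ih region st (fun u hu => hg u (List.mem_cons_of_mem _ hu)) ?_
          (by simp only [muA, List.length_cons] at hmu ⊢; omega) x hx n hE
        intro r hr m hEm
        rcases hH r hr m hEm with h | h
        · exact Or.inl h
        · rcases List.mem_cons.1 h with rfl | h
          · exact Or.inl ((PySem.Set.contains_iff _ _).1 hc)
          · exact Or.inr h
      · rw [if_neg hc] at hx ⊢
        have hcr : c ∉ region := fun hm => hc ((PySem.Set.contains_iff _ _).2 hm)
        have hgc : goodCell data v c = true := hg c List.mem_cons_self
        have hmu' : muA data v (PySem.Set.add region c)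
            (((deltas.map (nb c)).filter (goodCell data v)).reverse ++ st) ≤ f := by
          have hcard := card_drop hgc hcr
          have hns := ns_len_le data v c
          simp only [muA, List.length_append, List.length_reverse, List.length_cons] at hmu ⊢
          omega
        refine ih _ _ ?_ ?_ hmu' x hx n hE
        · intro u hu
          rcases List.mem_append.1 hu with hu | hu
          · exact ((mem_succs data v c u).1 (List.mem_reverse.1 hu)).2
          · exact hg u (List.mem_cons_of_mem _ hu)
        · intro r hr m hEm
          rcases (PySem.Set.mem_add _ _ _).1 hr with hr | rfl
          · rcases hH r hr m hEm with h | h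
            · exact Or.inl ((PySem.Set.mem_add _ _ _).2 (Or.inl h))
            · rcases List.mem_cons.1 h with rfl | h
              · exact Or.inl ((PySem.Set.mem_add _ _ _).2 (Or.inr rfl))
              · exact Or.inr (List.mem_append_right _ h)
          · exact Or.inr (List.mem_append_left _
              (List.mem_reverse.2 ((mem_succs data v r m).2 hEm)))

lemma dfsA_reach (data : List (Int × Int × String)) (v : Option String) (c0 : Int × Int) :
    ∀ (f : Nat) (region : PySem.Set (Int × Int)) (stack : List (Int × Int)),
      (∀ x ∈ region, Reach data v c0 x) → (∀ s ∈ stack, Reach data v c0 s) →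
      ∀ x ∈ getRegionLoop data v f region stack, Reach data v c0 x := by
  intro f
  induction f with
  | zero => intro region stack hR _ x hx; exact hR x (by simpa [getRegionLoop] using hx)
  | succ f ih =>
    intro region stack hR hS x hx
    cases stack with
    | nil => exact hR x (by simpa [getRegionLoop] using hx)
    | cons c st =>
      simp only [getRegionLoop] at hx
      by_cases hc : PySem.Set.contains region c = true
      · rw [if_pos hc] at hx
        exact ih region st hR (fun u hu => hS u (List.mem_cons_of_mem _ hu)) x hx
      · rw [if_neg hc] at hx
        have hRc : Reach data v c0 c := hS c List.mem_cons_self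
        refine ih _ _ ?_ ?_ x hx
        · intro u hu
          rcases (PySem.Set.mem_add _ _ _).1 hu with hu | rfl
          · exact hR u hu
          · exact hRc
        · intro u hu
          rcases List.mem_append.1 hu with hu | hu
          · exact hRc.tail ((mem_succs data v c u).1 (List.mem_reverse.1 hu))
          · exact hS u (List.mem_cons_of_mem _ hu)

lemma dfsA_nodup (data : List (Int × Int × String)) (v : Option String) :
    ∀ (f : Nat) (region : PySem.Set (Int × Int)) (stack : List (Int × Int)),
      region.Nodup → (getRegionLoop data v f region stack).Nodup := by
  intro f
  induction f with
  | zero => intro region stack h; simpa [getRegionLoop] using h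
  | succ f ih =>
    intro region stack h
    cases stack with
    | nil => simpa [getRegionLoop] using h
    | cons c st =>
      simp only [getRegionLoop]
      by_cases hc : PySem.Set.contains region c = true
      · rw [if_pos hc]; exact ih _ _ h
      · rw [if_neg hc]; exact ih _ _ (PySem.Set.nodup_add _ _ h)

lemma getRegion_mem {data : List (Int × Int × String)} {c0 : Int × Int}
    (h : (dget data c0).isSome = true) (x : Int × Int) :
    x ∈ getRegion data c0 ↔ Reach data (dget data c0) c0 x := by
  have hgood : goodCell data (dget data c0) c0 = true := by
    simp [goodCell, h]
  have hmu : muA data (dget data c0) PySem.Set.empty [c0] ≤ 5 * data.length + 2 := by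
    have h1 : ((Kf data (dget data c0)) \ (PySem.Set.empty : PySem.Set (Int × Int)).toFinset).card
        ≤ data.length := le_trans (Finset.card_le_card (Finset.sdiff_subset)) (card_Kf_le _ _)
    simp only [muA, List.length_cons, List.length_nil]
    omega
  constructor
  · exact fun hx => dfsA_reach data (dget data c0) c0 _ _ _ (fun u hu => by cases hu)
      (fun u hu => by rcases List.mem_cons.1 hu with rfl | hu; exacts [Relation.ReflTransGen.refl, by cases hu]) x hx
  · intro hreach
    induction hreach with
    | refl =>
      exact dfsA_stack_mem data (dget data c0) _ _ _
        (fun u hu => by rcases List.mem_cons.1 hu with rfl | hu; exacts [hgood, by cases hu]) hmu c0 List.mem_cons_self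
    | tail hab hbc ihb =>
      exact dfsA_closed data (dget data c0) _ _ _
        (fun u hu => by rcases List.mem_cons.1 hu with rfl | hu; exacts [hgood, by cases hu])
        (fun r hr => by cases hr) hmu _ ihb _ hbc

-- ---- bridges between B's helpers and A's ----

lemma lookB_eq_dget (data : List (Int × Int × String)) (c : Int × Int) :
    lookB data c = dget data c := by
  induction data with
  | nil => rfl
  | cons t rest ih =>
    obtain ⟨a, b, s⟩ := t
    by_cases h : (((a, b) : Int × Int) == c) = true
    · rw [lookB, if_pos h, dget, List.find?_cons_of_pos (by simpa [pvKey] using h)]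
      rfl
    · rw [lookB, if_neg h, dget, List.find?_cons_of_neg (by simpa [pvKey] using h)]
      exact ih

lemma nbrsB_eq_map (c : Int × Int) : nbrsB c = deltas.map (nb c) := by
  simp only [nbrsB, deltas, nb, List.map_cons, List.map_nil]
  norm_num
  constructor <;> ring

lemma goodCell_some_iff (data : List (Int × Int × String)) (v : String) (n : Int × Int) :
    goodCell data (some v) n = true ↔ dget data n = some v := by
  cases h : dget data n <;> simp [goodCell, h]

-- ---- class theory: regions are the components of the same-value adjacency ----

lemma reach_value {data : List (Int × Int × String)} {v : Option String} {c0 x : Int × Int}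
    (h : Reach data v c0 x) : x = c0 ∨ dget data x = v := by
  induction h with
  | refl => exact Or.inl rfl
  | tail hab hbc ih =>
    right
    have := hbc.2
    simp only [goodCell, Bool.and_eq_true, beq_iff_eq] at this
    exact this.2

lemma estep_symm {data : List (Int × Int × String)} {v : Option String} {c n : Int × Int}
    (hc : goodCell data v c = true) (h : Estep data v c n) : Estep data v n c := by
  obtain ⟨⟨d, hd, rfl⟩, _⟩ := h
  refine ⟨?_, hc⟩
  simp only [deltas, List.mem_cons, List.not_mem_nil, or_false] at hd
  rcases hd with rfl | rfl | rfl | rfl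
  · exact ⟨(0, -1), by simp [deltas], by simp [nb]⟩
  · exact ⟨(-1, 0), by simp [deltas], by simp [nb]⟩
  · exact ⟨(0, 1), by simp [deltas], by simp [nb]⟩
  · exact ⟨(1, 0), by simp [deltas], by simp [nb]⟩

lemma reach_symm {data : List (Int × Int × String)} {v : Option String} {c0 x : Int × Int}
    (hv : (dget data c0).isSome = true) (hveq : v = dget data c0)
    (h : Reach data v c0 x) : Reach data v x c0 := by
  have hgood0 : goodCell data v c0 = true := by
    subst hveq; simp [goodCell, hv]
  induction h with
  | refl => exact Relation.ReflTransGen.refl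
  | tail hab hbc ih =>
    rename_i b x'
    have hgoodb : goodCell data v b = true := by
      rcases reach_value hab with rfl | hb
      · exact hgood0
      · simp only [goodCell, Bool.and_eq_true, beq_iff_eq]
        subst hveq
        exact ⟨by rw [hb]; exact hv, hb⟩
    exact Relation.ReflTransGen.head (estep_symm hgoodb hbc) ih

lemma mem_region_value {data : List (Int × Int × String)} {r x : Int × Int}
    (hr : (dget data r).isSome = true) (hx : x ∈ getRegion data r) :
    dget data x = dget data r := by
  rcases reach_value ((getRegion_mem hr x).1 hx) with rfl | h
  · rfl
  · exact h

lemma regions_meet {data : List (Int × Int × String)} {r r' z : Int × Int}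
    (hr : (dget data r).isSome = true) (hr' : (dget data r').isSome = true)
    (hz : z ∈ getRegion data r) (hz' : z ∈ getRegion data r') :
    r' ∈ getRegion data r := by
  have hvz : dget data z = dget data r := mem_region_value hr hz
  have hvz' : dget data z = dget data r' := mem_region_value hr' hz'
  have hvv : dget data r' = dget data r := by rw [← hvz', hvz]
  have h1 : Reach data (dget data r) r z := (getRegion_mem hr z).1 hz
  have h2 : Reach data (dget data r') r' z := (getRegion_mem hr' z).1 hz'
  have h2' : Reach data (dget data r) r' z := by rwa [hvv] at h2
  have h3 : Reach data (dget data r) z r' :=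
    reach_symm hr' (by rw [hvv]) h2'
  exact (getRegion_mem hr r').2 (h1.trans h3)

lemma region_nbr_iff {data : List (Int × Int × String)} {r c n : Int × Int} {v : String}
    (hr : dget data r = some v) (hc : c ∈ getRegion data r)
    (hn : ∃ d ∈ deltas, n = nb c d) :
    n ∈ getRegion data r ↔ dget data n = some v := by
  have hrs : (dget data r).isSome = true := by rw [hr]; rfl
  constructor
  · intro h
    rw [mem_region_value hrs h, hr]
  · intro h
    have hE : Estep data (dget data r) c n :=
      ⟨hn, by rw [hr]; exact (goodCell_some_iff data v n).2 h⟩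
    exact (getRegion_mem hrs n).2 (((getRegion_mem hrs c).1 hc).tail hE)

-- ---- B's BFS computes the same components ----

lemma innerB (data : List (Int × Int × String)) (v : String) (ds : List (Int × Int)) :
    ∀ (seen : PySem.Set (Int × Int)) (rest : List (Int × Int)), seen.Nodup →
    ∃ new, (ds.foldl
        (fun (p : PySem.Set (Int × Int) × List (Int × Int)) n =>
          if !PySem.Set.contains p.1 n && (lookB data n == some v) then
            (PySem.Set.add p.1 n, p.2 ++ [n])
          else p) (seen, rest)) = (seen ++ new, rest ++ new)
      ∧ (seen ++ new).Nodup
      ∧ (∀ n ∈ new, dget data n = some v ∧ n ∉ seen ∧ n ∈ ds)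
      ∧ (∀ n ∈ ds, dget data n = some v → n ∈ seen ++ new) := by
  induction ds with
  | nil =>
    intro seen rest hnd
    exact ⟨[], by simp, by simpa using hnd, by simp, by simp⟩
  | cons n ds ih =>
    intro seen rest hnd
    simp only [List.foldl_cons]
    by_cases h : (!PySem.Set.contains seen n && (lookB data n == some v)) = true
    · have h' := h
      simp only [Bool.and_eq_true, Bool.not_eq_true'] at h'
      have hnm : n ∉ seen := fun hm => by
        rw [(PySem.Set.contains_iff seen n).2 hm] at h'
        exact Bool.noConfusion h'.1
      have hval : dget data n = some v := by
        have := h'.2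
        rw [lookB_eq_dget] at this
        exact eq_of_beq this
      have hadd : PySem.Set.add seen n = seen ++ [n] := PySem.Set.add_of_not_mem hnm
      have hnd' : (seen ++ [n]).Nodup := by
        rw [← hadd]; exact PySem.Set.nodup_add _ _ hnd
      obtain ⟨new', heq, hnd'', hprops, hcov⟩ := ih (seen ++ [n]) (rest ++ [n]) hnd'
      refine ⟨n :: new', ?_, ?_, ?_, ?_⟩
      · rw [if_pos h, hadd]
        rw [heq]
        simp
      · simpa using hnd''
      · intro m hm
        rcases List.mem_cons.1 hm with rfl | hm
        · exact ⟨hval, hnm, List.mem_cons_self⟩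
        · obtain ⟨h1, h2, h3⟩ := hprops m hm
          exact ⟨h1, fun hmm => h2 (List.mem_append_left _ hmm), List.mem_cons_of_mem _ h3⟩
      · intro m hm hmv
        rcases List.mem_cons.1 hm with rfl | hm
        · simp
        · have := hcov m hm hmv
          simpa using this
    · obtain ⟨new, heq, hnd', hprops, hcov⟩ := ih seen rest hnd
      refine ⟨new, ?_, hnd', ?_, ?_⟩
      · rw [if_neg h]; exact heq
      · intro m hm
        obtain ⟨h1, h2, h3⟩ := hprops m hm
        exact ⟨h1, h2, List.mem_cons_of_mem _ h3⟩
      · intro m hm hmv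
        rcases List.mem_cons.1 hm with rfl | hm
        · have hcm : PySem.Set.contains seen m = true := by
            by_contra hcm
            rw [Bool.not_eq_true] at hcm
            apply h
            rw [lookB_eq_dget, hmv, hcm]
            simp
          exact List.mem_append_left _ ((PySem.Set.contains_iff _ _).1 hcm)
        · exact hcov m hm hmv

def muG (data : List (Int × Int × String)) (v : String)
    (seen queue : List (Int × Int)) : Nat :=
  5 * ((Kf data (some v)) \ seen.toFinset).card + queue.length

lemma card_grow {data : List (Int × Int × String)} {v : String} :
    ∀ {new seen : List (Int × Int)}, (seen ++ new).Nodup →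
    (∀ n ∈ new, dget data n = some v ∧ n ∉ seen) →
    ((Kf data (some v)) \ (seen ++ new).toFinset).card + new.length =
      ((Kf data (some v)) \ seen.toFinset).card := by
  intro new
  induction new with
  | nil => intro seen _ _; simp
  | cons n rest ih =>
    intro seen hnd hp
    have hnm : n ∉ seen := (hp n List.mem_cons_self).2
    have hval : dget data n = some v := (hp n List.mem_cons_self).1
    have hstep : ((Kf data (some v)) \ (seen ++ [n]).toFinset).card + 1 =
        ((Kf data (some v)) \ seen.toFinset).card := by
      rw [← PySem.Set.add_of_not_mem hnm]
      exact card_drop ((goodCell_some_iff data v n).2 hval) hnm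
    have hnd' : ((seen ++ [n]) ++ rest).Nodup := by
      simpa using hnd
    have hnrest : n ∉ rest := by
      have : (n :: rest).Nodup := (List.nodup_append.1 hnd).2.1
      exact (List.nodup_cons.1 this).1
    have hrest := ih hnd' (fun m hm => by
      obtain ⟨h1, h2⟩ := hp m (List.mem_cons_of_mem _ hm)
      refine ⟨h1, fun hmm => ?_⟩
      rcases List.mem_append.1 hmm with hmm | hmm
      · exact h2 hmm
      · simp only [List.mem_singleton] at hmm
        subst hmm
        exact hnrest hm)
    have hre : (seen ++ n :: rest).toFinset = ((seen ++ [n]) ++ rest).toFinset := by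
      simp
    rw [hre]
    simp only [List.length_cons]
    omega

lemma grow_nodup (data : List (Int × Int × String)) (v : String) :
    ∀ (f : Nat) (seen : PySem.Set (Int × Int)) (queue : List (Int × Int)),
      seen.Nodup → (growB data v f seen queue).Nodup := by
  intro f
  induction f with
  | zero => intro seen queue h; simpa [growB] using h
  | succ f ih =>
    intro seen queue h
    cases queue with
    | nil => simpa [growB] using h
    | cons c rest =>
      simp only [growB]
      obtain ⟨new, heq, hnd, _, _⟩ := innerB data v (nbrsB c) seen rest h
      rw [heq]
      exact ih _ _ hnd

lemma grow_mono (data : List (Int × Int × String)) (v : String) :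
    ∀ (f : Nat) (seen : PySem.Set (Int × Int)) (queue : List (Int × Int)),
      seen.Nodup → ∀ x ∈ seen, x ∈ growB data v f seen queue := by
  intro f
  induction f with
  | zero => intro seen queue _ x hx; simpa [growB] using hx
  | succ f ih =>
    intro seen queue hnd x hx
    cases queue with
    | nil => simpa [growB] using hx
    | cons c rest =>
      simp only [growB]
      obtain ⟨new, heq, hnd', _, _⟩ := innerB data v (nbrsB c) seen rest hnd
      rw [heq]
      exact ih _ _ hnd' x (List.mem_append_left _ hx)

lemma grow_reach (data : List (Int × Int × String)) (v : String) (c0 : Int × Int) :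
    ∀ (f : Nat) (seen : PySem.Set (Int × Int)) (queue : List (Int × Int)),
      seen.Nodup → (∀ q ∈ queue, q ∈ seen) →
      (∀ x ∈ seen, Reach data (some v) c0 x) →
      ∀ x ∈ growB data v f seen queue, Reach data (some v) c0 x := by
  intro f
  induction f with
  | zero => intro seen queue _ _ hR x hx; exact hR x (by simpa [growB] using hx)
  | succ f ih =>
    intro seen queue hnd hq hR x hx
    cases queue with
    | nil => exact hR x (by simpa [growB] using hx)
    | cons c rest =>
      simp only [growB] at hx
      obtain ⟨new, heq, hnd', hprops, _⟩ := innerB data v (nbrsB c) seen rest hnd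
      rw [heq] at hx
      refine ih _ _ hnd' ?_ ?_ x hx
      · intro q hqm
        rcases List.mem_append.1 hqm with hqm | hqm
        · exact List.mem_append_left _ (hq q (List.mem_cons_of_mem _ hqm))
        · exact List.mem_append_right _ hqm
      · intro u hu
        rcases List.mem_append.1 hu with hu | hu
        · exact hR u hu
        · obtain ⟨hval, _, hin⟩ := hprops u hu
          have hadj : ∃ d ∈ deltas, u = nb c d := by
            rw [nbrsB_eq_map] at hin
            obtain ⟨d, hd, rfl⟩ := List.mem_map.1 hin
            exact ⟨d, hd, rfl⟩
          have hE : Estep data (some v) c u :=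
            ⟨hadj, (goodCell_some_iff data v u).2 hval⟩
          exact (hR c (hq c List.mem_cons_self)).tail hE

lemma grow_closed (data : List (Int × Int × String)) (v : String) :
    ∀ (f : Nat) (seen : PySem.Set (Int × Int)) (queue : List (Int × Int)),
      seen.Nodup →
      (∀ s ∈ seen, s ∉ queue → ∀ n, Estep data (some v) s n → n ∈ seen) →
      muG data v seen queue ≤ f →
      ∀ x ∈ growB data v f seen queue, ∀ n, Estep data (some v) x n →
        n ∈ growB data v f seen queue := by
  intro f
  induction f with
  | zero =>
    intro seen queue _ hH hmu x hx n hE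
    have hq : queue = [] := List.eq_nil_of_length_eq_zero (by simp only [muG] at hmu; omega)
    subst hq
    simp only [growB] at hx ⊢
    exact hH x hx List.not_mem_nil n hE
  | succ f ih =>
    intro seen queue hnd hH hmu x hx n hE
    cases queue with
    | nil =>
      simp only [growB] at hx ⊢
      exact hH x hx List.not_mem_nil n hE
    | cons c rest =>
      simp only [growB] at hx ⊢
      obtain ⟨new, heq, hnd', hprops, hcov⟩ := innerB data v (nbrsB c) seen rest hnd
      rw [heq] at hx ⊢
      have hcard := card_grow (data := data) (v := v) hnd'
        (fun m hm => ⟨(hprops m hm).1, (hprops m hm).2.1⟩)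
      have hmu' : muG data v (seen ++ new) (rest ++ new) ≤ f := by
        simp only [muG, List.length_append, List.length_cons] at hmu ⊢
        omega
      refine ih _ _ hnd' ?_ hmu' x hx n hE
      intro s hs hsq m hEm
      rcases List.mem_append.1 hs with hs | hs
      · by_cases hsc : s = c
        · subst hsc
          have hadj : m ∈ nbrsB s := by
            rw [nbrsB_eq_map]
            obtain ⟨d, hd, rfl⟩ := hEm.1
            exact List.mem_map.2 ⟨d, hd, rfl⟩
          have hval : dget data m = some v := (goodCell_some_iff data v m).1 hEm.2
          exact hcov m hadj hval
        · have : s ∉ c :: rest := by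
            intro hmem
            rcases List.mem_cons.1 hmem with h | h
            · exact hsc h
            · exact hsq (List.mem_append_left _ h)
          exact List.mem_append_left _ (hH s hs this m hEm)
      · exact absurd (List.mem_append_right rest hs) hsq

lemma componentB_spec {data : List (Int × Int × String)} {start : Int × Int} {v : String}
    (hk : dget data start = some v) :
    (componentB data start).Nodup ∧
      ∀ x, x ∈ componentB data start ↔ x ∈ getRegion data start := by
  have hks : (dget data start).isSome = true := by rw [hk]; rfl
  have hcb : componentB data start = growB data v (5 * data.length + 2) [start] [start] := by
    rw [componentB, lookB_eq_dget, hk]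
  have hnd0 : ([start] : List (Int × Int)).Nodup := List.nodup_singleton _
  have hmu : muG data v [start] [start] ≤ 5 * data.length + 2 := by
    have h1 : ((Kf data (some v)) \ ([start] : List (Int × Int)).toFinset).card ≤ data.length :=
      le_trans (Finset.card_le_card Finset.sdiff_subset) (card_Kf_le _ _)
    simp only [muG, List.length_cons, List.length_nil]
    omega
  constructor
  · rw [hcb]; exact grow_nodup data v _ _ _ hnd0
  · intro x
    rw [hcb, getRegion_mem hks, hk]
    constructor
    · refine fun hx => grow_reach data v start _ _ _ hnd0 (fun q hq => hq) ?_ x hx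
      intro u hu
      rcases List.mem_cons.1 hu with rfl | hu
      · exact Relation.ReflTransGen.refl
      · cases hu
    · intro hreach
      induction hreach with
      | refl => exact grow_mono data v _ _ _ hnd0 start List.mem_cons_self
      | tail hab hbc ihb =>
        refine grow_closed data v _ _ _ hnd0 ?_ hmu _ ihb _ hbc
        intro s hs hsq
        rcases List.mem_cons.1 hs with rfl | hs
        · exact absurd List.mem_cons_self hsq
        · cases hs

-- ---- the block structure of B's labels dict ----

def flatL (bs : List ((Int × Int) × List (Int × Int))) : List ((Int × Int) × (Int × Int)) :=
  bs.flatMap (fun b => b.2.map (fun c => (c, b.1)))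

def cellsOf (bs : List ((Int × Int) × List (Int × Int))) : List (Int × Int) :=
  bs.flatMap (fun b => b.2)

def GoodBlocks (data : List (Int × Int × String))
    (bs : List ((Int × Int) × List (Int × Int))) : Prop :=
  (∀ b ∈ bs, (dget data b.1).isSome = true ∧ b.2.Nodup ∧ b.1 ∈ b.2 ∧
      (∀ x, x ∈ b.2 ↔ x ∈ getRegion data b.1)) ∧
  bs.Pairwise (fun b b' => ∀ x, x ∈ b.2 → x ∉ b'.2)

lemma mem_cellsOf {bs : List ((Int × Int) × List (Int × Int))} {x : Int × Int} :
    x ∈ cellsOf bs ↔ ∃ b ∈ bs, x ∈ b.2 := by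
  simp [cellsOf]

lemma map_fst_flatL (bs : List ((Int × Int) × List (Int × Int))) :
    (flatL bs).map Prod.fst = cellsOf bs := by
  simp [flatL, cellsOf, List.map_flatMap, Function.comp_def]

-- ===== the main simultaneous induction: A's fold and B's label fold walk the same blocks =====

lemma build_eq (data : List (Int × Int × String)) :
    ∀ (rem : List (Int × Int × String)), (∀ t ∈ rem, t ∈ data) →
    ∀ (bs : List ((Int × Int) × List (Int × Int))) (sA : Int) (vis : PySem.Set (Int × Int)),
      GoodBlocks data bs → vis.Nodup → (∀ x, x ∈ vis ↔ x ∈ cellsOf bs) →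
      ∃ bs', GoodBlocks data (bs ++ bs') ∧
        (rem.foldl (fun (st : Int × PySem.Set (Int × Int)) t =>
            if PySem.Set.contains st.2 (pvKey t) then st
            else
              let region := getRegion data (pvKey t)
              (st.1 + costA region, PySem.Set.union st.2 region)) (sA, vis)).1 =
          sA + (bs'.map (fun b => costA (getRegion data b.1))).sum ∧
        (rem.foldl (fun (lab : PySem.Dict (Int × Int) (Int × Int)) t =>
            if PySem.Dict.contains lab (t.1, t.2.1) then lab
            else (componentB data (t.1, t.2.1)).foldl
              (fun lab c => PySem.Dict.insert lab c (t.1, t.2.1)) lab)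
          (PySem.Dict.mk (flatL bs))) = PySem.Dict.mk (flatL (bs ++ bs')) := by
  intro rem
  induction rem with
  | nil =>
    intro _ bs sA vis hbs _ _
    exact ⟨[], by simpa using hbs, by simp, by simp⟩
  | cons t rem ih =>
    intro hrem bs sA vis hbs hnd hvis
    have hrem' : ∀ u ∈ rem, u ∈ data := fun u hu => hrem u (List.mem_cons_of_mem _ hu)
    have hkdata : pvKey t ∈ data.map pvKey := List.mem_map_of_mem (hrem t List.mem_cons_self)
    have hks : (dget data (pvKey t)).isSome = true := (dget_isSome_iff _ _).2 hkdata
    have hDmem : ∀ x, PySem.Dict.contains (PySem.Dict.mk (flatL bs)) x = true ↔ x ∈ cellsOf bs := by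
      intro x
      rw [PySem.Dict.contains_iff_mem_keys]
      show x ∈ PySem.Dict.keys ⟨flatL bs⟩ ↔ _
      rw [PySem.Dict.keys_mk, map_fst_flatL]
    simp only [List.foldl_cons]
    by_cases hm : pvKey t ∈ cellsOf bs
    · rw [if_pos ((PySem.Set.contains_iff vis (pvKey t)).2 ((hvis (pvKey t)).2 hm)),
        if_pos ((hDmem ((t.1, t.2.1) : Int × Int)).2 hm)]
      exact ih hrem' bs sA vis hbs hnd hvis
    · have hcA : ¬ PySem.Set.contains vis (pvKey t) = true := fun hc =>
        hm ((hvis (pvKey t)).1 ((PySem.Set.contains_iff _ _).1 hc))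
      have hcB : ¬ PySem.Dict.contains (PySem.Dict.mk (flatL bs)) ((t.1, t.2.1) : Int × Int) = true := fun hc =>
        hm ((hDmem ((t.1, t.2.1) : Int × Int)).1 hc)
      rw [if_neg hcA, if_neg hcB]
      obtain ⟨v, hv⟩ := Option.isSome_iff_exists.1 hks
      obtain ⟨hLnd, hLmem⟩ := componentB_spec (start := pvKey t) hv
      have hself : pvKey t ∈ componentB data (pvKey t) :=
        (hLmem (pvKey t)).2 ((getRegion_mem hks (pvKey t)).2 Relation.ReflTransGen.refl)
      -- a cell of the new component lies in no old block
      have hfresh : ∀ c ∈ componentB data (pvKey t), c ∉ cellsOf bs := by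
        intro c hc hcold
        obtain ⟨b, hbbs, hcb⟩ := mem_cellsOf.1 hcold
        have hbsome : (dget data b.1).isSome = true := (hbs.1 b hbbs).1
        have hcR : c ∈ getRegion data b.1 := ((hbs.1 b hbbs).2.2.2 c).1 hcb
        have hkR : pvKey t ∈ getRegion data b.1 :=
          regions_meet hbsome hks hcR ((hLmem c).1 hc)
        exact hm (mem_cellsOf.2 ⟨b, hbbs, ((hbs.1 b hbbs).2.2.2 (pvKey t)).2 hkR⟩)
      have hnewgood : GoodBlocks data (bs ++ [(pvKey t, componentB data (pvKey t))]) := by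
        constructor
        · intro b hb
          rcases List.mem_append.1 hb with hb | hb
          · exact hbs.1 b hb
          · simp only [List.mem_singleton] at hb
            subst hb
            exact ⟨hks, hLnd, hself, hLmem⟩
        · rw [List.pairwise_append]
          refine ⟨hbs.2, List.pairwise_singleton _ _, ?_⟩
          intro b hb b' hb' x hxb
          simp only [List.mem_singleton] at hb'
          subst hb'
          exact fun hxL => hfresh x hxL (mem_cellsOf.2 ⟨b, hb, hxb⟩)
      -- B's insert loop over fresh keys appends the new block
      have hBstep : ((componentB data ((t.1, t.2.1) : Int × Int)).foldl
          (fun lab c => PySem.Dict.insert lab c (t.1, t.2.1)) (PySem.Dict.mk (flatL bs))) =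
          PySem.Dict.mk (flatL (bs ++ [(pvKey t, componentB data (pvKey t))])) := by
        apply PySem.Dict.ext
        have hfr : ∀ c ∈ componentB data (pvKey t),
            PySem.Dict.contains (PySem.Dict.mk (flatL bs)) ((fun (a : Int × Int) => a) c) = false := by
          intro c hc
          rw [← Bool.not_eq_true]
          exact fun hcon => hfresh c hc ((hDmem c).1 hcon)
        have := PySem.Dict.items_foldl_insert_fresh (componentB data ((t.1, t.2.1) : Int × Int))
          (fun (a : Int × Int) => a) (fun _ => ((t.1, t.2.1) : Int × Int))
          (PySem.Dict.mk (flatL bs)) hfr (by simpa using hLnd)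
        rw [show (fun (lab : PySem.Dict (Int × Int) (Int × Int)) c =>
            PySem.Dict.insert lab c (t.1, t.2.1)) =
          (fun (d : PySem.Dict (Int × Int) (Int × Int)) a =>
            PySem.Dict.insert d ((fun (a : Int × Int) => a) a) ((fun _ => ((t.1, t.2.1) : Int × Int)) a)) from rfl]
        rw [this]
        show flatL bs ++ _ = flatL (bs ++ [(pvKey t, componentB data (pvKey t))])
        rw [show flatL (bs ++ [(pvKey t, componentB data (pvKey t))]) =
          flatL bs ++ flatL [(pvKey t, componentB data (pvKey t))] from List.flatMap_append ..]
        simp [flatL, pvKey]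
      rw [hBstep]
      -- A's step: add the region's cost and union in its cells
      have hvis' : ∀ x, x ∈ PySem.Set.union vis (getRegion data (pvKey t)) ↔
          x ∈ cellsOf (bs ++ [(pvKey t, componentB data (pvKey t))]) := by
        intro x
        rw [PySem.Set.mem_union]
        constructor
        · rintro (hx | hx)
          · obtain ⟨b, hb, hxb⟩ := mem_cellsOf.1 ((hvis x).1 hx)
            exact mem_cellsOf.2 ⟨b, List.mem_append_left _ hb, hxb⟩
          · exact mem_cellsOf.2 ⟨(pvKey t, componentB data (pvKey t)),
              List.mem_append_right _ (List.mem_singleton.2 rfl), (hLmem x).2 hx⟩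
        · intro hx
          obtain ⟨b, hb, hxb⟩ := mem_cellsOf.1 hx
          rcases List.mem_append.1 hb with hb | hb
          · exact Or.inl ((hvis x).2 (mem_cellsOf.2 ⟨b, hb, hxb⟩))
          · simp only [List.mem_singleton] at hb
            subst hb
            exact Or.inr ((hLmem x).1 hxb)
      obtain ⟨bs'', hgood'', hA'', hB''⟩ := ih hrem'
        (bs ++ [(pvKey t, componentB data (pvKey t))])
        (sA + costA (getRegion data (pvKey t)))
        (PySem.Set.union vis (getRegion data (pvKey t)))
        hnewgood (PySem.Set.nodup_union _ _ hnd) hvis'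
      refine ⟨(pvKey t, componentB data (pvKey t)) :: bs'', ?_, ?_, ?_⟩
      · rw [show bs ++ (pvKey t, componentB data (pvKey t)) :: bs'' =
          (bs ++ [(pvKey t, componentB data (pvKey t))]) ++ bs'' by simp]
        exact hgood''
      · rw [hA'']
        simp only [List.map_cons, List.sum_cons]
        ring
      · rw [hB'']
        rw [show bs ++ (pvKey t, componentB data (pvKey t)) :: bs'' =
          (bs ++ [(pvKey t, componentB data (pvKey t))]) ++ bs'' by simp]

-- ---- phases 2 and 3 of B evaluate to A's sum of costs ----

lemma map_snd_block (r : Int × Int) (L : List (Int × Int)) :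
    (L.map (fun c => (c, r))).map Prod.snd = List.replicate L.length r := by
  rw [List.map_map]
  simp [Function.comp_def]

lemma count_flat_zero (x : Int × Int) :
    ∀ (bs : List ((Int × Int) × List (Int × Int))), (∀ b ∈ bs, b.1 ≠ x) →
      ((flatL bs).map Prod.snd).count x = 0 := by
  intro bs
  induction bs with
  | nil => intro _; rfl
  | cons b tl ih =>
    intro h
    have hflat : flatL (b :: tl) = b.2.map (fun c => (c, b.1)) ++ flatL tl := rfl
    rw [hflat, List.map_append, List.count_append,
      ih (fun b' hb' => h b' (List.mem_cons_of_mem _ hb')), map_snd_block,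
      List.count_replicate]
    simp [h b List.mem_cons_self]

lemma area_count {data : List (Int × Int × String)} :
    ∀ {bs : List ((Int × Int) × List (Int × Int))}, GoodBlocks data bs →
      ∀ b ∈ bs, ((flatL bs).map Prod.snd).count b.1 = b.2.length := by
  intro bs
  induction bs with
  | nil => intro _ b hb; cases hb
  | cons hd tl ih =>
    intro hbs b hb
    have hpw := List.pairwise_cons.1 hbs.2
    have htl : GoodBlocks data tl :=
      ⟨fun b' hb' => hbs.1 b' (List.mem_cons_of_mem _ hb'), hpw.2⟩
    have hhd1 : hd.1 ∈ hd.2 := (hbs.1 hd List.mem_cons_self).2.2.1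
    have hflat : flatL (hd :: tl) = hd.2.map (fun c => (c, hd.1)) ++ flatL tl := rfl
    rw [hflat, List.map_append, List.count_append, map_snd_block, List.count_replicate]
    rcases List.mem_cons.1 hb with rfl | hb
    · rw [if_pos (by simp)]
      have h0 : ((flatL tl).map Prod.snd).count b.1 = 0 := by
        refine count_flat_zero _ tl (fun b' hb' hbeq => ?_)
        have hb'1 : b'.1 ∈ b'.2 := (htl.1 b' hb').2.2.1
        rw [hbeq] at hb'1
        exact hpw.1 b' hb' b.1 hhd1 hb'1
      rw [h0]
      omega
    · have hne : (hd.1 == b.1) = false := by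
        simp only [beq_eq_false_iff_ne, ne_eq]
        intro heq
        have hb1 : b.1 ∈ b.2 := (htl.1 b hb).2.2.1
        rw [← heq] at hb1
        exact hpw.1 b hb hd.1 hhd1 hb1
      rw [hne]
      simp only [Bool.false_eq_true, if_false, Nat.zero_add]
      exact ih htl b hb

lemma per_cell_edges {data : List (Int × Int × String)} {r c : Int × Int} {v : String}
    (hr : dget data r = some v) (hc : c ∈ getRegion data r) :
    ((nbrsB c).foldl
        (fun e n => if lookB data n != lookB data c then e + 1 else e) (0 : Int)) =
      4 - deltas.foldl (fun nbrs d =>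
        if PySem.Set.contains (getRegion data r) (nb c d) then nbrs + 1 else nbrs) (0 : Int) := by
  have hrs : (dget data r).isSome = true := by rw [hr]; rfl
  have hcv : dget data c = some v := by rw [mem_region_value hrs hc, hr]
  have key : ∀ d ∈ deltas, PySem.Set.contains (getRegion data r) (nb c d) =
      (dget data (nb c d) == some v) := by
    intro d hd
    by_cases hmem : nb c d ∈ getRegion data r
    · rw [(PySem.Set.contains_iff _ _).2 hmem]
      have := (region_nbr_iff hr hc ⟨d, hd, rfl⟩).1 hmem
      simp [this]
    · have h2 : ¬ dget data (nb c d) = some v := fun hv =>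
        hmem ((region_nbr_iff hr hc ⟨d, hd, rfl⟩).2 hv)
      have h1 : PySem.Set.contains (getRegion data r) (nb c d) = false := by
        rw [← Bool.not_eq_true]
        exact fun hcon => hmem ((PySem.Set.contains_iff _ _).1 hcon)
      rw [h1]
      symm
      simpa using h2
  rw [PySem.List.foldl_if_add_one, PySem.List.foldl_if_add_one]
  have hmap : (nbrsB c).countP (fun n => lookB data n != lookB data c) =
      deltas.countP (fun d => !PySem.Set.contains (getRegion data r) (nb c d)) := by
    rw [nbrsB_eq_map, List.countP_map]
    refine List.countP_congr ?_
    intro d hd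
    simp only [Function.comp]
    rw [lookB_eq_dget, lookB_eq_dget, hcv, key d hd]
    simp [bne]
  have hlen : deltas.countP (fun d => PySem.Set.contains (getRegion data r) (nb c d)) +
      deltas.countP (fun d => !PySem.Set.contains (getRegion data r) (nb c d)) = 4 := by
    have := List.length_eq_countP_add_countP
      (fun d => PySem.Set.contains (getRegion data r) (nb c d)) (l := deltas)
    simp only [deltas] at this ⊢
    simp only [List.length_cons, List.length_nil] at this
    rw [show (fun a => decide ¬(PySem.Set.contains (getRegion data r) (nb c a) = true)) =
      (fun d => !PySem.Set.contains (getRegion data r) (nb c d)) from ?_] at this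
    · omega
    · funext a; simp
  rw [hmap]
  have h4 : deltas.countP (fun d => PySem.Set.contains (getRegion data r) (nb c d)) ≤ 4 := by
    have := List.countP_le_length (l := deltas)
      (p := fun d => PySem.Set.contains (getRegion data r) (nb c d))
    simpa [deltas] using this
  omega

lemma per_block_sum {data : List (Int × Int × String)} {r : Int × Int} {v : String}
    {L : List (Int × Int)} (hr : dget data r = some v) (hL : L.Nodup)
    (hmem : ∀ x, x ∈ L ↔ x ∈ getRegion data r) :
    ((L.map (fun c => (L.length : Int) *
        ((nbrsB c).foldl
          (fun e n => if lookB data n != lookB data c then e + 1 else e) (0 : Int)))).sum) =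
      costA (getRegion data r) := by
  have hRnd : (getRegion data r).Nodup := dfsA_nodup data _ _ _ _ List.nodup_nil
  have hperm : L.Perm (getRegion data r) := (List.perm_ext_iff_of_nodup hL hRnd).2 hmem
  rw [List.sum_map_mul_left, costA, PySem.List.foldl_add, zero_add, hperm.length_eq]
  congr 1
  rw [(hperm.map (fun c => (nbrsB c).foldl
      (fun e n => if lookB data n != lookB data c then e + 1 else e) (0 : Int))).sum_eq]
  exact congrArg List.sum (List.map_congr_left (fun c hcR => per_cell_edges hr hcR))

lemma phase3 {data : List (Int × Int × String)} (areaD : PySem.Dict (Int × Int) Int) :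
    ∀ (bs : List ((Int × Int) × List (Int × Int))),
      (∀ b ∈ bs, (dget data b.1).isSome = true ∧ b.2.Nodup ∧
        (∀ x, x ∈ b.2 ↔ x ∈ getRegion data b.1) ∧
        PySem.Dict.getD areaD b.1 0 = (b.2.length : Int)) →
      ∀ (acc : Int),
      ((flatL bs).foldl
          (fun tot cr =>
            tot + PySem.Dict.getD areaD cr.2 0 *
              ((nbrsB cr.1).foldl
                (fun e n => if lookB data n != lookB data cr.1 then e + 1 else e) (0 : Int)))
          acc) =
        acc + (bs.map (fun b => costA (getRegion data b.1))).sum := by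
  intro bs
  induction bs with
  | nil => intro _ acc; simp [flatL]
  | cons b tl ih =>
    intro hbs acc
    have hbstl : ∀ b' ∈ tl, (dget data b'.1).isSome = true ∧ b'.2.Nodup ∧
        (∀ x, x ∈ b'.2 ↔ x ∈ getRegion data b'.1) ∧
        PySem.Dict.getD areaD b'.1 0 = (b'.2.length : Int) :=
      fun b' hb' => hbs b' (List.mem_cons_of_mem _ hb')
    obtain ⟨hsome, hnd, hmem, harea⟩ := hbs b List.mem_cons_self
    obtain ⟨v, hv⟩ := Option.isSome_iff_exists.1 hsome
    have hflat : flatL (b :: tl) = b.2.map (fun c => (c, b.1)) ++ flatL tl := rfl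
    rw [hflat, List.foldl_append, List.foldl_map]
    have hblock : (b.2.foldl
        (fun tot c =>
          tot + PySem.Dict.getD areaD b.1 0 *
            ((nbrsB c).foldl
              (fun e n => if lookB data n != lookB data c then e + 1 else e) (0 : Int)))
        acc) = acc + costA (getRegion data b.1) := by
      rw [harea]
      have := PySem.List.foldl_add b.2
        (fun c => ((b.2.length : Nat) : Int) *
          ((nbrsB c).foldl
            (fun e n => if lookB data n != lookB data c then e + 1 else e) (0 : Int))) acc
      rw [show (fun tot c =>
          tot + ((b.2.length : Nat) : Int) *
            ((nbrsB c).foldl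
              (fun e n => if lookB data n != lookB data c then e + 1 else e) (0 : Int))) =
        (fun acc_1 x =>
          acc_1 + ((b.2.length : Nat) : Int) *
            ((nbrsB x).foldl
              (fun e n => if lookB data n != lookB data x then e + 1 else e) (0 : Int))) from rfl] at this
      rw [this, per_block_sum hv hnd hmem]
    rw [hblock, ih hbstl, List.map_cons, List.sum_cons]
    ring

-- ===== VERDICT (by name: the statement is the Claim_ definition above) =====
theorem part_1_spec : Claim_equal_part_1 := by
  intro data _ _
  show part_1 data = part_1_alt data
  obtain ⟨BS, hBS, hA, hB⟩ := build_eq data data (fun t ht => ht) [] 0 PySem.Set.empty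
    ⟨fun b hb => absurd hb List.not_mem_nil, List.Pairwise.nil⟩ List.nodup_nil
    (fun x => by simp [cellsOf, PySem.Set.empty])
  simp only [List.nil_append] at hBS hA hB
  have hA' : part_1 data = (BS.map (fun b => costA (getRegion data b.1))).sum := by
    show (data.foldl _ ((0 : Int), PySem.Set.empty)).1 = _
    rw [hA]
    ring
  rw [hA']
  simp only [part_1_alt]
  rw [show (PySem.Dict.empty : PySem.Dict (Int × Int) (Int × Int)) =
    PySem.Dict.mk (flatL []) from rfl, hB]
  rw [PySem.Dict.foldl_insert_getD_add_one_eq_counter]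
  rw [show PySem.Dict.values (PySem.Dict.mk (flatL BS)) = (flatL BS).map Prod.snd from
    PySem.Dict.values_mk _]
  rw [show PySem.Dict.items (PySem.Dict.mk (flatL BS)) = flatL BS from rfl]
  rw [phase3 (PySem.Dict.counter ((flatL BS).map Prod.snd)) BS ?_ 0]
  · ring
  · intro b hb
    obtain ⟨hsome, hnd, _, hmem⟩ := hBS.1 b hb
    refine ⟨hsome, hnd, hmem, ?_⟩
    rw [PySem.Dict.getD_counter, area_count hBS b hb]
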